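-- pv_equiv track=rewrite | github.com/pypi-data/pypi-mirror-399 | packages/onfire/onfire-0.1.1.tar.gz/onfire-0.1.1/termsite/__main__.py | _make_fire_ramp
-- ===== SOURCE A (Python) =====
-- from typing import List, Sequence, Tuple
--
-- _XTERM_LEVELS = (0, 95, 135, 175, 215, 255)
--
-- def _clamp(x: int, lo: int, hi: int) -> int:
--     return lo if x < lo else hi if x > hi else x
--
-- def _rgb_to_xterm_256(r: int, g: int, b: int) -> int:
--     """Approximate RGB -> xterm-256 index (0..255)."""
--     r = _clamp(r, 0, 255)
--     g = _clamp(g, 0, 255)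
--     b = _clamp(b, 0, 255)
--
--     # Grayscale ramp (232..255) is often smoother for near-equal RGB.
--     if abs(r - g) < 8 and abs(g - b) < 8:
--         v = (r + g + b) // 3
--         if v < 8:
--             return 16
--         if v > 238:
--             return 231
--         return 232 + ((v - 8) // 10)
--
--     def nearest_level(v: int) -> int:
--         best_i = 0
--         best_d = 10**9
--         for i, lv in enumerate(_XTERM_LEVELS):
--             d = abs(lv - v)
--             if d < best_d:
--                 best_d = d
--                 best_i = i
--         return best_i
--
--     ri = nearest_level(r)
--     gi = nearest_level(g)
--     bi = nearest_level(b)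
--     return 16 + 36 * ri + 6 * gi + bi
--
-- def _make_fire_ramp(steps: int = 64) -> List[int]:
--     """
--     Build a smooth fire gradient as xterm-256 color indices.
--     Interpolates across a few hand-picked RGB stops, then quantizes to xterm.
--     """
--     stops = [
--         (0, 0, 0),  # black
--         (40, 0, 0),  # very dark red
--         (140, 0, 0),  # red
--         (255, 60, 0),  # orange-red
--         (255, 160, 0),  # orange
--         (255, 230, 80),  # yellow-ish
--         (255, 255, 255),  # white
--     ]
--
--     if steps < 8:
--         steps = 8
--
--     segs = len(stops) - 1
--     out: List[int] = []
--     for i in range(steps):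
--         t = i / (steps - 1)
--         s = min(segs - 1, int(t * segs))
--         local_t = (t * segs) - s
--         r0, g0, b0 = stops[s]
--         r1, g1, b1 = stops[s + 1]
--         r = int(r0 + (r1 - r0) * local_t)
--         g = int(g0 + (g1 - g0) * local_t)
--         b = int(b0 + (b1 - b0) * local_t)
--         out.append(_rgb_to_xterm_256(r, g, b))
--
--     # De-duplicate adjacent repeats (xterm quantization can cause duplicates).
--     dedup: List[int] = [out[0]]
--     for c in out[1:]:
--         if c != dedup[-1]:
--             dedup.append(c)
--     return dedup
-- ===== SOURCE B (Python) =====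
-- from typing import List
--
--
-- def _fire_level(v: int) -> int:
--     # closed-form bucket: midpoints between xterm cube levels (0,95,135,175,215,255),
--     # with <= so the lower index wins at the 95/135 tie (v == 115)
--     return 0 if v <= 47 else 1 if v <= 115 else 2 if v <= 155 else 3 if v <= 195 else 4 if v <= 235 else 5
--
--
-- def _fire_xterm(r: int, g: int, b: int) -> int:
--     r = min(255, max(0, r))
--     g = min(255, max(0, g))
--     b = min(255, max(0, b))
--     if abs(r - g) < 8 and abs(g - b) < 8:
--         v = (r + g + b) // 3
--         return 16 if v < 8 else 231 if v > 238 else 232 + (v - 8) // 10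
--     return 16 + 36 * _fire_level(r) + 6 * _fire_level(g) + _fire_level(b)
--
--
-- def _make_fire_ramp(steps: int = 64) -> List[int]:
--     stops = [
--         (0, 0, 0),
--         (40, 0, 0),
--         (140, 0, 0),
--         (255, 60, 0),
--         (255, 160, 0),
--         (255, 230, 80),
--         (255, 255, 255),
--     ]
--     if steps < 8:
--         steps = 8
--     segs = len(stops) - 1
--     ramp: List[int] = []
--     last = None
--     for i in range(steps):
--         t6 = (i / (steps - 1)) * segs
--         s = min(segs - 1, int(t6))
--         lt = t6 - s
--         (r0, g0, b0), (r1, g1, b1) = stops[s], stops[s + 1]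
--         c = _fire_xterm(
--             int(r0 + (r1 - r0) * lt),
--             int(g0 + (g1 - g0) * lt),
--             int(b0 + (b1 - b0) * lt),
--         )
--         if c != last:  # fused adjacent-deduplication: append only on change
--             ramp.append(c)
--             last = c
--     return ramp
-- ===== Notes on version B (the rewrite author's own statement) =====
-- stated objective: faster
-- what changed: The per-channel nearest-level scan over _XTERM_LEVELS (three 6-element abs/compare loops per pixel) is replaced by a closed-form threshold bucket (midpoints with <= to preserve the lower-index tie rule), and the separate adjacent-duplicate removal pass is fused into the generation loop by tracking the last appended index; the interpolation float math is kept byte-for-byte.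
import Mathlib
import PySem

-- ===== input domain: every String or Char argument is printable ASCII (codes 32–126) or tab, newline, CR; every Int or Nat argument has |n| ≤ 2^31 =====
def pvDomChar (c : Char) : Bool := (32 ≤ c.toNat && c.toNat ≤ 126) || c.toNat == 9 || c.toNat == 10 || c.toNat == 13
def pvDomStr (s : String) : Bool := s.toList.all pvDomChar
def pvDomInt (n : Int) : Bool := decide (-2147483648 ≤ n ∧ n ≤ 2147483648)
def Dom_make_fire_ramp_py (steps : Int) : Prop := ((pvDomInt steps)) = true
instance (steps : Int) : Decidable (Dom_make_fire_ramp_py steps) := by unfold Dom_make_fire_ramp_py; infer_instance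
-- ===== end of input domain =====

-- B replaces A's nearest-level scan by closed-form thresholds and fuses the dedup pass into the
-- generation loop (objective: alternative; same O(steps) cost; float math kept byte-for-byte).
--
-- Python float arithmetic (i/(steps-1), *6, -, int()) is modelled EXACTLY by an IEEE-754 binary64
-- emulator over ℚ (round to nearest, ties to even), shared verbatim by both ports: pvFround rounds
-- a rational to the nearest double; pvFDiv/pvFMul/pvFAdd/pvFSub are the correctly-rounded float
-- ops; pvTrunc is Python's int() (truncation toward zero). All intermediate values here are normal
-- doubles (no overflow/subnormals on the stated domain), where this model is exact.

-- round n/d (d > 0) to the nearest integer, ties to even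
def pvRHE (n d : Nat) : Nat :=
  let q := n / d
  let r := n % d
  if 2 * r < d then q else if d < 2 * r then q + 1 else if q % 2 = 0 then q else q + 1

-- the pair (n', d') with n'/d' = (a/b) * 2^(-e)
def pvScale (a b : Nat) (e : Int) : Nat × Nat :=
  if 0 ≤ e then (a, b * 2 ^ e.toNat) else (a * 2 ^ (-e).toNat, b)

-- move e one step toward the window 2^52 ≤ (a/b)*2^(-e) < 2^53
def pvFix (a b : Nat) (e : Int) : Int :=
  let p := pvScale a b e
  if 2 ^ 53 * p.2 ≤ p.1 then e + 1 else if p.1 < 2 ^ 52 * p.2 then e - 1 else e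

-- nearest binary64 value of a rational (round half to even)
def pvFround (x : ℚ) : ℚ :=
  if x = 0 then 0
  else
    let a := x.num.natAbs
    let b := x.den
    let e := pvFix a b (pvFix a b ((Nat.log2 a : Int) - (Nat.log2 b : Int) - 53))
    let p := pvScale a b e
    let m := pvRHE p.1 p.2
    let mag : ℚ := if 0 ≤ e then (m : ℚ) * 2 ^ e.toNat else (m : ℚ) / 2 ^ (-e).toNat
    if x.num < 0 then -mag else mag

def pvFDiv (x y : ℚ) : ℚ := pvFround (x / y)
def pvFMul (x y : ℚ) : ℚ := pvFround (x * y)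
def pvFAdd (x y : ℚ) : ℚ := pvFround (x + y)
def pvFSub (x y : ℚ) : ℚ := pvFround (x - y)

-- Python int(float): truncation toward zero
def pvTrunc (q : ℚ) : Int := q.num.tdiv q.den

-- the hand-picked RGB stops (same literal table in both Pythons)
def pvStops : List (Int × Int × Int) :=
  [(0, 0, 0), (40, 0, 0), (140, 0, 0), (255, 60, 0), (255, 160, 0), (255, 230, 80), (255, 255, 255)]

-- stops[s]; the index is provably in range on every reachable call (s = min 5 …, s ≥ 0)
def pvStop (s : Int) : Int × Int × Int := (PySem.List.pyGet? pvStops s).getD (0, 0, 0)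

-- ===== PORT A =====

def clampA (x lo hi : Int) : Int := if x < lo then lo else if hi < x then hi else x

-- A's nearest_level: linear scan over _XTERM_LEVELS keeping (best_i, best_d)
def nearestA (v : Int) : Int :=
  (([((0 : Int), (0 : Int)), (1, 95), (2, 135), (3, 175), (4, 215), (5, 255)]).foldl
      (fun (st : Int × Int) p =>
        let d := |p.2 - v|
        if d < st.2 then (p.1, d) else st)
      (0, 10 ^ 9)).1

def rgbA (r g b : Int) : Int :=
  let r := clampA r 0 255
  let g := clampA g 0 255
  let b := clampA b 0 255
  if |r - g| < 8 ∧ |g - b| < 8 then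
    let v := PySem.Int.floordiv (r + g + b) 3
    if v < 8 then 16 else if 238 < v then 231 else 232 + PySem.Int.floordiv (v - 8) 10
  else 16 + 36 * nearestA r + 6 * nearestA g + nearestA b

-- one iteration of A's main loop: the interpolated color for index i
def colorA (i : Nat) (steps : Int) : Int :=
  let t := pvFDiv (i : ℚ) ((steps : ℚ) - 1)
  let t6 := pvFMul t 6
  let s : Int := min 5 (pvTrunc t6)
  let lt := pvFSub t6 (s : ℚ)
  let p0 := pvStop s
  let p1 := pvStop (s + 1)
  rgbA (pvTrunc (pvFAdd (p0.1 : ℚ) (pvFMul ((p1.1 - p0.1 : Int) : ℚ) lt)))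
       (pvTrunc (pvFAdd (p0.2.1 : ℚ) (pvFMul ((p1.2.1 - p0.2.1 : Int) : ℚ) lt)))
       (pvTrunc (pvFAdd (p0.2.2 : ℚ) (pvFMul ((p1.2.2 - p0.2.2 : Int) : ℚ) lt)))

-- step of A's dedup loop: append c iff c != dedup[-1]
def pvDedupStep (d : List Int) (c : Int) : List Int :=
  if some c ≠ PySem.List.pyGet? d (-1) then d ++ [c] else d

-- A's second pass; the [] branch is unreachable (out has ≥ 8 elements, Python never indexes [])
def pvDedupA : List Int → List Int
  | [] => []
  | c0 :: rest => rest.foldl pvDedupStep [c0]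

def make_fire_ramp_py (steps : Int) : List Int :=
  let steps := if steps < 8 then 8 else steps
  let out := (List.range steps.toNat).foldl (fun acc i => acc ++ [colorA i steps]) []
  pvDedupA out

-- ===== PORT B =====

-- B's closed-form quantizer: midpoints between the cube levels, <= keeps the lower-index tie
def bucketB (v : Int) : Int :=
  if v ≤ 47 then 0
  else if v ≤ 115 then 1
  else if v ≤ 155 then 2
  else if v ≤ 195 then 3
  else if v ≤ 235 then 4
  else 5

def rgbB (r g b : Int) : Int :=
  let r := min 255 (max 0 r)
  let g := min 255 (max 0 g)
  let b := min 255 (max 0 b)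
  if |r - g| < 8 ∧ |g - b| < 8 then
    let v := PySem.Int.floordiv (r + g + b) 3
    if v < 8 then 16 else if 238 < v then 231 else 232 + PySem.Int.floordiv (v - 8) 10
  else 16 + 36 * bucketB r + 6 * bucketB g + bucketB b

-- one iteration of B's loop: same float math, threshold quantizer
def colorB (i : Nat) (steps : Int) : Int :=
  let t6 := pvFMul (pvFDiv (i : ℚ) ((steps : ℚ) - 1)) 6
  let s : Int := min 5 (pvTrunc t6)
  let lt := pvFSub t6 (s : ℚ)
  let p0 := pvStop s
  let p1 := pvStop (s + 1)
  rgbB (pvTrunc (pvFAdd (p0.1 : ℚ) (pvFMul ((p1.1 - p0.1 : Int) : ℚ) lt)))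
       (pvTrunc (pvFAdd (p0.2.1 : ℚ) (pvFMul ((p1.2.1 - p0.2.1 : Int) : ℚ) lt)))
       (pvTrunc (pvFAdd (p0.2.2 : ℚ) (pvFMul ((p1.2.2 - p0.2.2 : Int) : ℚ) lt)))

-- B's fused dedup: append only when the color differs from the last appended one
def pvStepB (st : List Int × Option Int) (c : Int) : List Int × Option Int :=
  if some c ≠ st.2 then (st.1 ++ [c], some c) else st

def make_fire_ramp_py_alt (steps : Int) : List Int :=
  let steps := max 8 steps
  ((List.range steps.toNat).foldl (fun st i => pvStepB st (colorB i steps)) ([], none)).1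

-- ===== PRECONDITION & SPEC =====
def Spec_make_fire_ramp_py (steps : Int) (out : List Int) : Prop := out = make_fire_ramp_py_alt steps
instance (steps : Int) (out : List Int) : Decidable (Spec_make_fire_ramp_py steps out) := by unfold Spec_make_fire_ramp_py; infer_instance

-- ===== CLAIM (what is proved, stated in full; the proofs are below) =====
def Claim_equal_make_fire_ramp_py : Prop := ∀ (steps : Int), Dom_make_fire_ramp_py steps → Spec_make_fire_ramp_py steps (make_fire_ramp_py steps)

-- ===== LEMMAS AND PROOFS =====

lemma clamp_eq (x : Int) : clampA x 0 255 = min 255 (max 0 x) := by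
  unfold clampA; split_ifs <;> omega

set_option maxRecDepth 4000 in
lemma nearest_key : ∀ n : Nat, n < 256 → nearestA (n : Int) = bucketB (n : Int) := by decide

lemma nearest_eq (v : Int) (h0 : 0 ≤ v) (h1 : v ≤ 255) : nearestA v = bucketB v := by
  obtain ⟨n, rfl⟩ := Int.eq_ofNat_of_zero_le h0
  exact nearest_key n (by omega)

lemma rgb_eq (r g b : Int) : rgbA r g b = rgbB r g b := by
  simp only [rgbA, rgbB, clamp_eq]
  by_cases h : |min 255 (max 0 r) - min 255 (max 0 g)| < 8 ∧ |min 255 (max 0 g) - min 255 (max 0 b)| < 8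
  · simp [h]
  · rw [if_neg h, if_neg h,
        nearest_eq (min 255 (max 0 r)) (by omega) (by omega),
        nearest_eq (min 255 (max 0 g)) (by omega) (by omega),
        nearest_eq (min 255 (max 0 b)) (by omega) (by omega)]

lemma color_eq (i : Nat) (steps : Int) : colorA i steps = colorB i steps := by
  simp only [colorA, colorB]
  exact rgb_eq _ _ _

lemma foldl_app (f : Nat → Int) :
    ∀ (l : List Nat) (acc : List Int),
      l.foldl (fun a i => a ++ [f i]) acc = acc ++ l.map f := by
  intro l
  induction l with
  | nil => simp
  | cons a l ih => intro acc; simp [ih]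

-- the invariant tying B's fused fold (state (list, last)) to A's dedup fold over the color list
lemma ded_inv (f : Nat → Int) :
    ∀ (l : List Nat) (d : List Int) (y : Int),
      PySem.List.pyGet? d (-1) = some y →
      (l.foldl (fun st i => pvStepB st (f i)) (d, some y)).1 = (List.map f l).foldl pvDedupStep d := by
  intro l
  induction l with
  | nil => intro d y _; simp
  | cons a l ih =>
    intro d y h
    simp only [List.foldl_cons, List.map_cons]
    by_cases hc : f a = y
    · have h1 : pvStepB (d, some y) (f a) = (d, some y) := by simp [pvStepB, hc]
      have h2 : pvDedupStep d (f a) = d := by simp [pvDedupStep, h, hc]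
      rw [h1, h2]
      exact ih d y h
    · have h1 : pvStepB (d, some y) (f a) = (d ++ [f a], some (f a)) := by simp [pvStepB, hc]
      have h2 : pvDedupStep d (f a) = d ++ [f a] := by
        simp [pvDedupStep, h, hc]
      rw [h1, h2]
      exact ih (d ++ [f a]) (f a) (PySem.List.pyGet?_neg_one_append_singleton ..)

lemma fused_eq (f : Nat → Int) (m : Nat) :
    ((List.range (m + 1)).foldl (fun st i => pvStepB st (f i)) ([], none)).1
      = pvDedupA ((List.range (m + 1)).map f) := by
  rw [List.range_succ_eq_map]
  simp only [List.foldl_cons, List.map_cons, pvDedupA]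
  have h1 : pvStepB ([], none) (f 0) = ([f 0], some (f 0)) := by simp [pvStepB]
  rw [h1, ded_inv f _ [f 0] (f 0) (by simp [PySem.List.pyGet?_neg_one])]

-- ===== VERDICT (by name: the statement is the Claim_ definition above) =====
theorem make_fire_ramp_py_spec : Claim_equal_make_fire_ramp_py := by
  intro steps _
  unfold Spec_make_fire_ramp_py
  simp only [make_fire_ramp_py, make_fire_ramp_py_alt]
  have hs : (if steps < 8 then (8 : Int) else steps) = max 8 steps := by
    split_ifs <;> omega
  rw [hs]
  have h8 : (8 : Int) ≤ max 8 steps := le_max_left _ _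
  obtain ⟨m, hm⟩ : ∃ m, (max 8 steps).toNat = m + 1 :=
    ⟨(max 8 steps).toNat - 1, by omega⟩
  rw [hm, foldl_app (fun i => colorA i (max 8 steps)),
      fused_eq (fun i => colorB i (max 8 steps)) m]
  simp only [List.nil_append]
  congr 1
  exact List.map_congr_left fun i _ => color_eq i (max 8 steps)
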